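-- pv_equiv track=rewrite | github.com/Kim-Myeongseop/coding_practice | 프로그래머스/0/181921. 배열 만들기 2/배열 만들기 2.py | solution
-- ===== SOURCE A (Python) =====
-- def solution(l, r):
--     answer = []
--     for i in '05':
--         for j in '05':
--             for k in '05':
--                 for h in '05':
--                     for m in '05':
--                         for n in '05':
--                             x = int(i + j + k + h + m + n)
--                             if x == 0 or x < l:
--                                 continue
--                             if x <= r:
--                                 answer.append(x)
--                             else:
--                                 return answer if answer else [-1]
--     return answer if answer else [-1]
-- ===== SOURCE B (Python) =====
-- def solution(l, r):
--     # The 64 valid numbers are val(0) < val(1) < ... < val(63), where val(b) is the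
--     # number whose 6 decimal digits are the bits of b, each times 5.  The answer is
--     # a contiguous index range; find its endpoints by binary search, no enumeration.
--     def val(b):
--         x, m = 0, 1
--         for _ in range(6):
--             b, bit = divmod(b, 2)
--             x += bit * 5 * m
--             m *= 10
--         return x
--
--     def lower(lo, hi, pred):
--         # smallest i in [lo, hi] with pred(val(i)); hi if none (pred monotone)
--         while lo < hi:
--             mid = (lo + hi) // 2
--             if pred(val(mid)):
--                 hi = mid
--             else:
--                 lo = mid + 1
--         return lo
--
--     start = lower(0, 64, lambda v: v >= max(l, 1))
--     stop = lower(start, 64, lambda v: v > r)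
--     res = [val(b) for b in range(start, stop)]
--     return res if res else [-1]
-- ===== Notes on version B (the rewrite author's own statement) =====
-- stated objective: alternative
-- what changed: B never enumerates or filters the 64 candidates: it exploits that the valid numbers are val(0)<...<val(63) for a bit-to-digit decoder val, binary-searches the two endpoints of the answer's contiguous index interval, and maps val over just that index range.
import Mathlib
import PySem

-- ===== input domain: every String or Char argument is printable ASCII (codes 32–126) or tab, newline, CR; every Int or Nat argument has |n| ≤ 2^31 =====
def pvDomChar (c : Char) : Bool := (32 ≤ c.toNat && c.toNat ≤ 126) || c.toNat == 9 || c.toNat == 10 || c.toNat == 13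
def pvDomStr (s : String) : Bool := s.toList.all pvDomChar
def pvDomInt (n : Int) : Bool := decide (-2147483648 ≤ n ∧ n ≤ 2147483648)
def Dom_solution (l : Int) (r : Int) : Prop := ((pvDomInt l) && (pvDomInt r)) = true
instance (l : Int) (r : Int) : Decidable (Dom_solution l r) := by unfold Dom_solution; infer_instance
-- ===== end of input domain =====

-- B replaces A's six nested '05' loops by two binary searches for the endpoints of the answer's contiguous index range in the sorted value sequence (alternative algorithm, same asymptotic cost).


-- ===== PORT A =====
-- the literal string '05' each loop iterates over
def pvDigits : List Char := "05".toList

-- x = int(i + j + k + h + m + n); int() cannot fail here (six digit chars), so getD 0 is never taken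
def pvXval (i j k h m n : Char) : Int :=
  (PySem.Int.ofStr? (String.ofList [i, j, k, h, m, n])).getD 0

-- the innermost statement block of A: append / continue / early return (early return = Sum.inr)
def pvStepA (l r : Int) (s : Sum (List Int) (List Int)) (x : Int) : Sum (List Int) (List Int) :=
  match s with
  | .inr ret => .inr ret
  | .inl answer =>
    if x == 0 || x < l then .inl answer
    else if x ≤ r then .inl (answer ++ [x])
    else .inr (if answer = [] then [-1] else answer)

-- 'return answer if answer else [-1]' after the loops (inr = already returned inside)
def pvFinishA : Sum (List Int) (List Int) → List Int
  | .inl answer => if answer = [] then [-1] else answer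
  | .inr ret => ret

def solution (l : Int) (r : Int) : List Int :=
  pvFinishA <|
    pvDigits.foldl (fun s i =>
      pvDigits.foldl (fun s j =>
        pvDigits.foldl (fun s k =>
          pvDigits.foldl (fun s h =>
            pvDigits.foldl (fun s m =>
              pvDigits.foldl (fun s n =>
                pvStepA l r s (pvXval i j k h m n))
              s) s) s) s) s) (.inl [])

-- ===== PORT B =====
-- val(b): 6 iterations of b, bit = divmod(b, 2); x += bit*5*m; m *= 10  (state (b, x, m))
def pvVal (b0 : Int) : Int :=
  ((PySem.List.pyRange 0 6 1).foldl (fun (s : Int × Int × Int) _ =>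
      (PySem.Int.floordiv s.1 2,
       s.2.1 + PySem.Int.mod s.1 2 * 5 * s.2.2,
       s.2.2 * 10)) (b0, 0, 1)).2.1

-- the termination facts for the while loop's midpoint, cited by pvLower's decreasing_by
theorem pvMid_lt {lo hi : Int} (h : lo < hi) : PySem.Int.floordiv (lo + hi) 2 < hi := by
  rw [PySem.Int.floordiv_lt_iff_lt_mul (by omega)]; omega

theorem pvMid_ge {lo hi : Int} (h : lo < hi) : lo ≤ PySem.Int.floordiv (lo + hi) 2 := by
  rw [PySem.Int.le_floordiv_iff_mul_le (by omega)]; omega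

-- lower(lo, hi, pred): binary search while-loop, transcribed as recursion on hi - lo
def pvLower (p : Int → Bool) (lo hi : Int) : Int :=
  if h : lo < hi then
    let mid := PySem.Int.floordiv (lo + hi) 2
    if p (pvVal mid) then pvLower p lo mid else pvLower p (mid + 1) hi
  else lo
termination_by (hi - lo).toNat
decreasing_by
  · have := pvMid_ge h; have := pvMid_lt h; omega
  · have := pvMid_ge h; have := pvMid_lt h; omega

def solution_alt (l : Int) (r : Int) : List Int :=
  let start := pvLower (fun v => decide (v ≥ max l 1)) 0 64
  let stop := pvLower (fun v => decide (v > r)) start 64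
  let res := (PySem.List.pyRange start stop 1).map pvVal
  if res = [] then [-1] else res

-- ===== PRECONDITION & SPEC =====
def Spec_solution (l : Int) (r : Int) (out : List Int) : Prop := out = solution_alt l r
instance (l : Int) (r : Int) (out : List Int) : Decidable (Spec_solution l r out) := by unfold Spec_solution; infer_instance

-- ===== CLAIM (what is proved, stated in full; the proofs are below) =====
def Claim_equal_solution : Prop := ∀ (l : Int) (r : Int), Dom_solution l r → Spec_solution l r (solution l r)

-- ===== LEMMAS AND PROOFS =====
-- the 64 candidate values, in the order A generates them (ascending)
def pvNums : List Int := [0, 5, 50, 55, 500, 505, 550, 555, 5000, 5005, 5050, 5055, 5500, 5505, 5550, 5555, 50000, 50005, 50050, 50055, 50500, 50505, 50550, 50555, 55000, 55005, 55050, 55055, 55500, 55505, 55550, 55555, 500000, 500005, 500050, 500055, 500500, 500505, 500550, 500555, 505000, 505005, 505050, 505055, 505500, 505505, 505550, 505555, 550000, 550005, 550050, 550055, 550500, 550505, 550550, 550555, 555000, 555005, 555050, 555055, 555500, 555505, 555550, 555555]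

-- A's six nested loops flatten to one fold over the literal candidate list
lemma solution_eq_fold (l r : Int) :
    solution l r = pvFinishA (pvNums.foldl (pvStepA l r) (.inl [])) := by
  unfold solution
  simp only [← List.foldl_map]
  congr 1

lemma foldl_stepA_inr (l r : Int) (xs : List Int) (ret : List Int) :
    xs.foldl (pvStepA l r) (.inr ret) = .inr ret := by
  induction xs with
  | nil => rfl
  | cons x xs ih => simpa [pvStepA] using ih

-- A's early-exit loop over a sorted list computes exactly "filter, then empty-default"
lemma foldl_stepA_sorted (l r : Int) :
    ∀ (xs : List Int) (acc : List Int), xs.Pairwise (· ≤ ·) →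
      pvFinishA (xs.foldl (pvStepA l r) (.inl acc)) =
        (if acc ++ xs.filter (fun x => !(x == 0 || decide (x < l)) && decide (x ≤ r)) = []
         then [-1]
         else acc ++ xs.filter (fun x => !(x == 0 || decide (x < l)) && decide (x ≤ r))) := by
  intro xs
  induction xs with
  | nil => intro acc _; simp [pvFinishA]
  | cons x xs ih =>
    intro acc hp
    rw [List.pairwise_cons] at hp
    by_cases hskip : (x == 0 || decide (x < l)) = true
    · simp only [List.foldl_cons, pvStepA, hskip, List.filter_cons]
      simp only [Bool.not_true, Bool.false_and, Bool.false_eq_true, ite_false]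
      exact ih acc hp.2
    · by_cases hr : x ≤ r
      · have hstep : xs.foldl (pvStepA l r) (pvStepA l r (.inl acc) x) =
            xs.foldl (pvStepA l r) (.inl (acc ++ [x])) := by
          simp [pvStepA, hskip, hr]
        rw [List.foldl_cons, hstep, ih (acc ++ [x]) hp.2, List.filter_cons]
        simp [hskip, hr]
      · have hall : xs.filter (fun x => !(x == 0 || decide (x < l)) && decide (x ≤ r)) = [] := by
          refine List.filter_eq_nil_iff.mpr ?_
          intro y hy
          have : ¬ y ≤ r := fun h => hr (le_trans (hp.1 y hy) h)
          simp [this]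
        have hstep : pvStepA l r (.inl acc) x = .inr (if acc = [] then [-1] else acc) := by
          simp [pvStepA, hskip, hr]
        rw [List.foldl_cons, hstep, foldl_stepA_inr, List.filter_cons, hall]
        simp [pvFinishA, hskip, hr]

-- pvNums is exactly pvVal over the index range, and pvVal is strictly increasing there
lemma pvNums_eq_map : pvNums = (PySem.List.pyRange 0 64 1).map pvVal := by decide

set_option maxRecDepth 8000 in
lemma val_mono_nat : ∀ a ∈ List.range 64, ∀ b ∈ List.range 64,
    a < b → pvVal a < pvVal b := by decide

lemma val_mono {i j : Int} (h0 : 0 ≤ i) (hij : i < j) (hj : j < 64) : pvVal i < pvVal j := by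
  have hi : i = ((i.toNat : Nat) : Int) := (Int.toNat_of_nonneg h0).symm
  have hjn : j = ((j.toNat : Nat) : Int) := (Int.toNat_of_nonneg (by omega)).symm
  rw [hi, hjn]
  exact val_mono_nat i.toNat (List.mem_range.mpr (by omega))
    j.toNat (List.mem_range.mpr (by omega)) (by omega)

lemma val_mono_le {i j : Int} (h0 : 0 ≤ i) (hij : i ≤ j) (hj : j < 64) : pvVal i ≤ pvVal j := by
  rcases eq_or_lt_of_le hij with h | h
  · rw [h]
  · exact le_of_lt (val_mono h0 h hj)

lemma val_zero_or_pos {i : Int} (h0 : 0 ≤ i) (hi : i < 64) : pvVal i = 0 ∨ 1 ≤ pvVal i := by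
  rcases eq_or_lt_of_le h0 with h | h
  · left; rw [← h]; decide
  · right
    have : pvVal 0 < pvVal i := val_mono le_rfl h hi
    have h0' : pvVal 0 = 0 := by decide
    omega

-- one-step unfoldings of the while loop (zeta-reduced forms of pvLower's equation)
lemma pvLower_eq_pos {p : Int → Bool} {lo hi : Int} (h : lo < hi)
    (hp : p (pvVal (PySem.Int.floordiv (lo + hi) 2)) = true) :
    pvLower p lo hi = pvLower p lo (PySem.Int.floordiv (lo + hi) 2) := by
  conv_lhs => rw [pvLower]
  rw [dif_pos h]
  exact if_pos hp

lemma pvLower_eq_neg {p : Int → Bool} {lo hi : Int} (h : lo < hi)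
    (hp : p (pvVal (PySem.Int.floordiv (lo + hi) 2)) = false) :
    pvLower p lo hi = pvLower p (PySem.Int.floordiv (lo + hi) 2 + 1) hi := by
  conv_lhs => rw [pvLower]
  rw [dif_pos h]
  refine if_neg ?_
  rw [hp]
  simp

-- binary-search correctness: result is the threshold index of a monotone predicate
lemma lower_spec (p : Int → Bool) :
    ∀ (lo hi : Int), lo ≤ hi →
      (∀ i j, lo ≤ i → i ≤ j → j < hi → p (pvVal i) = true → p (pvVal j) = true) →
      lo ≤ pvLower p lo hi ∧ pvLower p lo hi ≤ hi ∧
        ∀ i, lo ≤ i → i < hi → p (pvVal i) = decide (pvLower p lo hi ≤ i) := by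
  intro lo hi
  induction lo, hi using pvLower.induct p with
  | case1 lo hi h mid hp ih =>
    intro _ hm
    have hmeq : mid = PySem.Int.floordiv (lo + hi) 2 := rfl
    have hmge := pvMid_ge h; have hmlt := pvMid_lt h
    obtain ⟨h1, h2, h3⟩ := ih hmge (fun i j hli hij hui => hm i j hli hij (by omega))
    rw [hmeq] at h1 h2 h3 hp
    rw [pvLower_eq_pos h hp]
    refine ⟨h1, by omega, fun i hli hui => ?_⟩
    by_cases hcase : i < PySem.Int.floordiv (lo + hi) 2
    · exact h3 i hli hcase
    · have hpi : p (pvVal i) = true := hm _ i hmge (by omega) hui hp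
      rw [hpi]
      exact (decide_eq_true (show pvLower p lo (PySem.Int.floordiv (lo + hi) 2) ≤ i by omega)).symm
  | case2 lo hi h mid hp ih =>
    intro _ hm
    have hmeq : mid = PySem.Int.floordiv (lo + hi) 2 := rfl
    have hmge := pvMid_ge h; have hmlt := pvMid_lt h
    obtain ⟨h1, h2, h3⟩ := ih (by omega) (fun i j hli hij hui => hm i j (by omega) hij hui)
    rw [hmeq] at h1 h2 h3 hp
    have hp' : p (pvVal (PySem.Int.floordiv (lo + hi) 2)) = false := by
      revert hp; cases p (pvVal (PySem.Int.floordiv (lo + hi) 2)) <;> simp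
    rw [pvLower_eq_neg h hp']
    refine ⟨by omega, h2, fun i hli hui => ?_⟩
    by_cases hcase : PySem.Int.floordiv (lo + hi) 2 + 1 ≤ i
    · exact h3 i hcase hui
    · have hpi : p (pvVal i) = false := by
        by_contra hc
        have : p (pvVal (PySem.Int.floordiv (lo + hi) 2)) = true :=
          hm i _ hli (by omega) (by omega)
            (by revert hc; cases p (pvVal i) <;> simp)
        rw [this] at hp'
        exact absurd hp' (by decide)
      rw [hpi]
      exact (decide_eq_false
        (show ¬ pvLower p (PySem.Int.floordiv (lo + hi) 2 + 1) hi ≤ i by omega)).symm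
  | case3 lo hi h =>
    intro hle _
    rw [pvLower, dif_neg h]
    exact ⟨le_rfl, hle, fun i hli hui => by omega⟩

-- ===== VERDICT (by name: the statement is the Claim_ definition above) =====
theorem solution_spec : Claim_equal_solution := by
  intro l r _
  unfold Spec_solution solution_alt
  obtain ⟨hs0, hs64, hsval⟩ := lower_spec (fun v => decide (v ≥ max l 1)) 0 64 (by omega)
    (fun i j hli hij hui hpi => by
      simp only [decide_eq_true_eq, ge_iff_le] at hpi ⊢
      exact le_trans hpi (val_mono_le hli hij hui))
  obtain ⟨hes, he64, heval⟩ := lower_spec (fun v => decide (v > r))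
      (pvLower (fun v => decide (v ≥ max l 1)) 0 64) 64 hs64
    (fun i j hli hij hui hpi => by
      simp only [decide_eq_true_eq] at hpi ⊢
      exact lt_of_lt_of_le hpi (val_mono_le (by omega) hij hui))
  set s := pvLower (fun v => decide (v ≥ max l 1)) 0 64 with hs
  set e := pvLower (fun v => decide (v > r)) s 64 with he
  -- the filtered candidate list of A equals the mapped index range of B
  have key : pvNums.filter (fun x => !(x == 0 || decide (x < l)) && decide (x ≤ r)) =
      (PySem.List.pyRange s e 1).map pvVal := by
    rw [pvNums_eq_map, List.filter_map]
    congr 1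
    have hsplit : PySem.List.pyRange 0 64 1 =
        PySem.List.pyRange 0 s 1 ++ (PySem.List.pyRange s e 1 ++ PySem.List.pyRange e 64 1) := by
      rw [PySem.List.pyRange_one_append 0 s 64 hs0 hs64,
          PySem.List.pyRange_one_append s e 64 hes he64]
    -- the filter predicate, at index i in [0,64), decides s ≤ i ∧ i < e
    have hq : ∀ i : Int, 0 ≤ i → i < 64 →
        ((fun x => !(x == 0 || decide (x < l)) && decide (x ≤ r)) ∘ pvVal) i =
          (decide (s ≤ i) && !decide (e ≤ i)) := by
      intro i h0 h64
      have hv1 : max l 1 ≤ pvVal i ↔ s ≤ i := decide_eq_decide.mp (hsval i h0 h64)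
      simp only [Function.comp]
      rcases val_zero_or_pos h0 h64 with hz | hpos
      · -- pvVal i = 0: A's test is false, and s ≤ i is false (max l 1 ≥ 1 > 0 = pvVal i)
        have hns : ¬ s ≤ i := fun hsi => by
          have h1 := hv1.mpr hsi
          have h2 : (1 : Int) ≤ max l 1 := le_max_right l 1
          omega
        simp [hz, hns]
      · -- pvVal i ≥ 1: x ≠ 0; x ≥ l ⟺ max l 1 ≤ x ⟺ s ≤ i; x ≤ r ⟺ i < e
        have hne : (pvVal i == 0) = false := by simp; omega
        by_cases hsi : s ≤ i
        · have hge : ¬ pvVal i < l := fun hlt => by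
            have h1 := hv1.mpr hsi
            have h2 : l ≤ max l 1 := le_max_left l 1
            omega
          have hv2 : r < pvVal i ↔ e ≤ i := decide_eq_decide.mp (heval i hsi h64)
          by_cases hei : e ≤ i
          · have hrv : ¬ pvVal i ≤ r := not_le.mpr (hv2.mpr hei)
            simp [hne, hge, hsi, hei, hrv]
          · have hrv : pvVal i ≤ r := by
              by_contra hc
              exact hei (hv2.mp (not_le.mp hc))
            simp [hne, hge, hsi, hei, hrv]
        · have hlt : pvVal i < l := by
            by_contra hc
            exact hsi (hv1.mp (max_le (not_lt.mp hc) hpos))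
          simp [hsi, hlt]
    rw [hsplit, List.filter_append, List.filter_append]
    have hA : (PySem.List.pyRange 0 s 1).filter
        ((fun x => !(x == 0 || decide (x < l)) && decide (x ≤ r)) ∘ pvVal) = [] := by
      refine List.filter_eq_nil_iff.mpr (fun i hi => ?_)
      rw [PySem.List.mem_pyRange_one] at hi
      rw [hq i hi.1 (by omega)]
      simp
      omega
    have hB : (PySem.List.pyRange s e 1).filter
        ((fun x => !(x == 0 || decide (x < l)) && decide (x ≤ r)) ∘ pvVal) =
        PySem.List.pyRange s e 1 := by
      refine List.filter_eq_self.mpr (fun i hi => ?_)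
      rw [PySem.List.mem_pyRange_one] at hi
      rw [hq i (by omega) (by omega)]
      simp
      omega
    have hC : (PySem.List.pyRange e 64 1).filter
        ((fun x => !(x == 0 || decide (x < l)) && decide (x ≤ r)) ∘ pvVal) = [] := by
      refine List.filter_eq_nil_iff.mpr (fun i hi => ?_)
      rw [PySem.List.mem_pyRange_one] at hi
      rw [hq i (by omega) hi.2]
      simp
      omega
    rw [hA, hB, hC, List.nil_append, List.append_nil]
  rw [solution_eq_fold, foldl_stepA_sorted l r pvNums [] (by decide), List.nil_append, key]
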